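-- pv_equiv track=rewrite | github.com/aalmendoza/token-rnn-tensorflow | source/lexer/fileUtilities.py | getLastNewLine
-- ===== SOURCE A (Python) =====
-- MAX_SIZE = 10000
--
-- def getLastNewLine(lexedTokens, lineDict, fileStart):
--     index = fileStart + MAX_SIZE-1
--     if(index >= len(lineDict)):
--         return len(lineDict) -1
--
--     curLine = lineDict[index]
--     for nC in reversed(range(index)):
--         if(lineDict[nC] < curLine):
--             return nC
--
--     return len(lineDict) - 1
-- ===== SOURCE B (Python) =====
-- MAX_SIZE = 10000
--
-- def getLastNewLine(lexedTokens, lineDict, fileStart):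
--     # single forward pass with a running "last hit" accumulator
--     n = len(lineDict)
--     index = fileStart + MAX_SIZE - 1
--     if index >= n:
--         return n - 1
--     curLine = lineDict[index]
--     best = n - 1
--     for i, v in enumerate(lineDict):
--         if i < index and v < curLine:
--             best = i
--     return best
-- ===== Notes on version B (the rewrite author's own statement) =====
-- stated objective: alternative
-- what changed: Replaces A's backward scan with early return by a single forward enumerate pass that keeps the last index whose line number is below curLine in an accumulator.
import Mathlib
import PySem

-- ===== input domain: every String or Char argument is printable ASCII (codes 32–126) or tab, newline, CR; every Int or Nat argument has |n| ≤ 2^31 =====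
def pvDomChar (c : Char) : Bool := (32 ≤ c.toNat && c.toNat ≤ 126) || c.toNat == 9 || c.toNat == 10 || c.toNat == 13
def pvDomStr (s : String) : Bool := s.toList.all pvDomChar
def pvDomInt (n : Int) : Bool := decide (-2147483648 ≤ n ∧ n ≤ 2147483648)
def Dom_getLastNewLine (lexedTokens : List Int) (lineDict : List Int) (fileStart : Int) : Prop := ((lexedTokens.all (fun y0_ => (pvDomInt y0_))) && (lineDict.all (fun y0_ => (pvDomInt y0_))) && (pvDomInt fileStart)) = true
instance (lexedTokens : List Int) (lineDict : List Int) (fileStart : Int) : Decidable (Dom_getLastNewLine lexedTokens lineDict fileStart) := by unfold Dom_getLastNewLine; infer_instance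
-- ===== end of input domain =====

-- B replaces A's backward early-return scan with a single forward enumerate pass that keeps a
-- running "last hit" accumulator (objective: alternative — a different traversal order, same cost).

-- ===== PORT A =====
def getLastNewLine (lexedTokens : List Int) (lineDict : List Int) (fileStart : Int) : Int :=
  let index := fileStart + 10000 - 1
  if index ≥ (lineDict.length : Int) then (lineDict.length : Int) - 1
  else
    match PySem.List.pyGet? lineDict index with
    | none => 0   -- IndexError in Python; excluded by Pre_
    | some curLine =>
      match (PySem.List.pyRange 0 index 1).reverse.find?
          (fun nC => decide (PySem.List.pyGetD lineDict nC 0 < curLine)) with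
      | some nC => nC
      | none => (lineDict.length : Int) - 1

-- ===== PORT B =====
def getLastNewLine_alt (lexedTokens : List Int) (lineDict : List Int) (fileStart : Int) : Int :=
  let n : Int := lineDict.length
  let index := fileStart + 10000 - 1
  if index ≥ n then n - 1
  else
    match PySem.List.pyGet? lineDict index with
    | none => -1   -- IndexError in Python; excluded by Pre_
    | some curLine =>
      (PySem.List.enumerate lineDict).foldl
        (fun best iv => if iv.1 < index ∧ iv.2 < curLine then iv.1 else best)
        (n - 1)

-- ===== PRECONDITION & SPEC =====
-- Pre_ excludes exactly the inputs where the Python A raises IndexError: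
-- fileStart + 9999 < -len(lineDict), where lineDict[fileStart + 9999] is out of range.
def Pre_getLastNewLine (lexedTokens : List Int) (lineDict : List Int) (fileStart : Int) : Prop :=
  -(lineDict.length : Int) ≤ fileStart + 10000 - 1
instance (lexedTokens : List Int) (lineDict : List Int) (fileStart : Int) : Decidable (Pre_getLastNewLine lexedTokens lineDict fileStart) := by unfold Pre_getLastNewLine; infer_instance
def pvWitness_getLastNewLine : List Int × List Int × Int := ([1, 2], [0, 0, 1, 1, 2], -9996)

def Spec_getLastNewLine (lexedTokens : List Int) (lineDict : List Int) (fileStart : Int) (out : Int) : Prop := out = getLastNewLine_alt lexedTokens lineDict fileStart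
instance (lexedTokens : List Int) (lineDict : List Int) (fileStart : Int) (out : Int) : Decidable (Spec_getLastNewLine lexedTokens lineDict fileStart out) := by unfold Spec_getLastNewLine; infer_instance

-- ===== CLAIM (what is proved, stated in full; the proofs are below) =====
def Claim_equal_getLastNewLine : Prop := ∀ (lexedTokens : List Int) (lineDict : List Int) (fileStart : Int), Dom_getLastNewLine lexedTokens lineDict fileStart → Pre_getLastNewLine lexedTokens lineDict fileStart → Spec_getLastNewLine lexedTokens lineDict fileStart (getLastNewLine lexedTokens lineDict fileStart)

-- ===== LEMMAS AND PROOFS =====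

-- the backward scan with early return IS "last element of the filtered list"
theorem reverse_find?_eq_getLast?_filter (l : List Int) (p : Int → Bool) :
    l.reverse.find? p = (l.filter p).getLast? := by
  rw [← List.head?_filter, List.filter_reverse, List.head?_reverse]

-- the forward "keep the last hit" fold IS "last element of the filtered list, or the default"
theorem foldl_lastHit (p : Int → Bool) (l : List Int) (d : Int) :
    l.foldl (fun acc x => if p x then x else acc) d = ((l.filter p).getLast?).getD d := by
  induction l generalizing d with
  | nil => rfl
  | cons x xs ih =>
    simp only [List.foldl_cons, List.filter_cons, ih]
    by_cases hx : p x
    · simp only [hx, if_pos, List.getLast?_cons]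
      cases h : (xs.filter p).getLast? <;> simp [h]
    · simp [hx]

-- a fold whose step never fires returns its initial value
theorem foldl_frozen {α β : Type} (f : β → α → β) (l : List α) (d : β)
    (h : ∀ acc, ∀ x ∈ l, f acc x = acc) : l.foldl f d = d := by
  induction l generalizing d with
  | nil => rfl
  | cons x xs ih =>
    rw [List.foldl_cons, h d x List.mem_cons_self]
    exact ih d (fun acc y hy => h acc y (List.mem_cons_of_mem _ hy))

theorem foldl_congr_of_mem {α β : Type} (f g : β → α → β) (l : List α) (d : β)
    (h : ∀ acc, ∀ x ∈ l, f acc x = g acc x) : l.foldl f d = l.foldl g d := by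
  induction l generalizing d with
  | nil => rfl
  | cons x xs ih =>
    rw [List.foldl_cons, List.foldl_cons, h d x List.mem_cons_self]
    exact ih _ (fun acc y hy => h acc y (List.mem_cons_of_mem _ hy))

-- ===== VERDICT (by name: the statement is the Claim_ definition above) =====
theorem getLastNewLine_spec : Claim_equal_getLastNewLine := by
  intro lexedTokens lineDict fileStart _ hpre
  unfold Pre_getLastNewLine at hpre
  unfold Spec_getLastNewLine getLastNewLine getLastNewLine_alt
  set index := fileStart + 10000 - 1 with hidx
  by_cases hlen : index ≥ (lineDict.length : Int)
  · simp [hlen]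
  · have hin : PySem.Raise.InRange lineDict.length index := by
      unfold PySem.Raise.InRange; omega
    obtain ⟨c, hc⟩ : ∃ c, PySem.List.pyGet? lineDict index = some c := by
      cases h : PySem.List.pyGet? lineDict index with
      | none => rw [PySem.List.pyGet?_eq_none_iff] at h; exact absurd hin h
      | some c => exact ⟨c, rfl⟩
    simp only [if_neg hlen, hc]
    -- rewrite B's enumerate fold as a fold over pyRange 0 n 1
    rw [PySem.List.enumerate_eq_map_pyRange (d := 0), List.foldl_map]
    simp only [PySem.List.len_eq]
    by_cases hpos : 0 ≤ index
    · -- split B's range at index; the tail beyond index never fires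
      rw [PySem.List.pyRange_one_append 0 index (lineDict.length : Int) hpos (le_of_not_ge hlen),
          List.foldl_append]
      rw [foldl_frozen _ (PySem.List.pyRange index (lineDict.length : Int) 1) _
          (by intro acc x hx
              rw [PySem.List.mem_pyRange_one] at hx
              have hge : ¬ (x < index) := not_lt.2 hx.1
              simp [hge])]
      rw [foldl_congr_of_mem _
            (fun acc j => if (fun nC => decide (PySem.List.pyGetD lineDict nC 0 < c)) j then j else acc)
            _ _
            (by intro acc x hx
                rw [PySem.List.mem_pyRange_one] at hx
                simp [hx.2])]
      rw [foldl_lastHit, ← reverse_find?_eq_getLast?_filter]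
      cases h : (PySem.List.pyRange 0 index 1).reverse.find?
          (fun nC => decide (PySem.List.pyGetD lineDict nC 0 < c)) <;> simp [h]
    · -- index < 0: A's range is empty, B's fold never fires
      rw [PySem.List.pyRange_one_eq_nil (by omega : index ≤ 0)]
      rw [foldl_frozen _ _ _
          (by intro acc x hx
              rw [PySem.List.mem_pyRange_one] at hx
              have : ¬ x < index := by omega
              simp [this])]
      simp
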